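-- pv_equiv track=rewrite | github.com/sakemin/SOME | utils/binarizer_utils.py | merge_slurs
-- ===== SOURCE A (Python) =====
-- from typing import Tuple
--
-- def merge_slurs(note_seq: list, note_dur: list, note_slur: list) -> Tuple[list, list]:
--     # merge slurs with the same pitch
--     note_seq_merge_slur = [note_seq[0]]
--     note_dur_merge_slur = [note_dur[0]]
--     for i in range(1, len(note_seq)):
--         if note_slur[i] and note_seq[i] == note_seq[i - 1]:
--             note_dur_merge_slur[-1] += note_dur[i]
--         else:
--             note_seq_merge_slur.append(note_seq[i])
--             note_dur_merge_slur.append(note_dur[i])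
--     return note_seq_merge_slur, note_dur_merge_slur
-- ===== SOURCE B (Python) =====
-- def merge_slurs(note_seq: list, note_dur: list, note_slur: list):
--     # Segment indices into runs (a run grows while the note is slurred and
--     # repeats the previous pitch), then reduce each run to one (pitch, duration).
--     runs = []
--     start = 0
--     for i in range(1, len(note_seq)):
--         if not (note_slur[i] and note_seq[i] == note_seq[i - 1]):
--             runs.append((start, i))
--             start = i
--     runs.append((start, len(note_seq)))
--     seqs = [note_seq[s] for s, _ in runs]
--     durs = []
--     for s, e in runs:
--         total = note_dur[s]
--         for j in range(s + 1, e):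
--             total += note_dur[j]
--         durs.append(total)
--     return seqs, durs
-- ===== Notes on version B (the rewrite author's own statement) =====
-- stated objective: alternative
-- what changed: B first segments the indices into runs (segment boundaries precomputed), then reduces each run to its first pitch and the sum of its durations, instead of A's single pass that mutates the last output element in place.
import Mathlib
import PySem

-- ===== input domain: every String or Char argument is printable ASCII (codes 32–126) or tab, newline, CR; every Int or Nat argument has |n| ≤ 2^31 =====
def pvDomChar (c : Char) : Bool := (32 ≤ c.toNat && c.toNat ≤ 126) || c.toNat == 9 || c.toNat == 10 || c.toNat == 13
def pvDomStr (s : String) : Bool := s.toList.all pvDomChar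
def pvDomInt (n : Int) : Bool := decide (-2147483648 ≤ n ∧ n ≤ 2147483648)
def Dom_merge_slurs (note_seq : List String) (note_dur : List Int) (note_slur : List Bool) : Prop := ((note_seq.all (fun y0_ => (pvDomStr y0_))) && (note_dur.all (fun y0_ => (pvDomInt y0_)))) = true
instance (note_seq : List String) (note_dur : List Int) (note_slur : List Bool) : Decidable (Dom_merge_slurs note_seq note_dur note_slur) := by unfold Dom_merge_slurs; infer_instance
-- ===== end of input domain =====

-- B segments the indices into runs first and then reduces each run to its first pitch and the
-- sum of its durations, instead of A's single pass mutating the last output element in place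
-- (objective: alternative decomposition, same cost).

-- ===== PORT A =====
-- literal transliteration of Source A: one pass, appending or adding into the last duration
def merge_slurs (note_seq : List String) (note_dur : List Int) (note_slur : List Bool) : List String × List Int :=
  (PySem.List.pyRange 1 (PySem.List.len note_seq) 1).foldl
    (fun (acc : List String × List Int) i =>
      if PySem.List.pyGetD note_slur i false &&
          decide (PySem.List.pyGetD note_seq i "" = PySem.List.pyGetD note_seq (i - 1) "") then
        (acc.1, acc.2.dropLast ++ [PySem.List.pyGetD acc.2 (-1) 0 + PySem.List.pyGetD note_dur i 0])
      else
        (acc.1 ++ [PySem.List.pyGetD note_seq i ""], acc.2 ++ [PySem.List.pyGetD note_dur i 0]))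
    ([PySem.List.pyGetD note_seq 0 ""], [PySem.List.pyGetD note_dur 0 0])

-- ===== PORT B =====
-- the run segmentation of Source B: list of half-open index intervals (start, end)
def msRuns (note_seq : List String) (note_slur : List Bool) : List (Int × Int) :=
  let st := (PySem.List.pyRange 1 (PySem.List.len note_seq) 1).foldl
    (fun (st : List (Int × Int) × Int) i =>
      if !(PySem.List.pyGetD note_slur i false &&
           decide (PySem.List.pyGetD note_seq i "" = PySem.List.pyGetD note_seq (i - 1) "")) then
        (st.1 ++ [(st.2, i)], i)
      else st) ([], 0)
  st.1 ++ [(st.2, PySem.List.len note_seq)]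

-- Source B's inner duration sum: total = note_dur[s]; for j in range(s+1, e): total += note_dur[j]
def msSumDur (note_dur : List Int) (s e : Int) : Int :=
  (PySem.List.pyRange (s + 1) e 1).foldl (fun t j => t + PySem.List.pyGetD note_dur j 0)
    (PySem.List.pyGetD note_dur s 0)

def merge_slurs_alt (note_seq : List String) (note_dur : List Int) (note_slur : List Bool) : List String × List Int :=
  let runs := msRuns note_seq note_slur
  (runs.map (fun r => PySem.List.pyGetD note_seq r.1 ""),
   runs.map (fun r => msSumDur note_dur r.1 r.2))

-- ===== PRECONDITION & SPEC =====
-- Pre_ excludes exactly the inputs where Python A raises IndexError: empty note_seq or note_dur,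
-- and (when there is more than one note) note_dur or note_slur shorter than note_seq.
def Pre_merge_slurs (note_seq : List String) (note_dur : List Int) (note_slur : List Bool) : Prop :=
  note_seq ≠ [] ∧ note_dur ≠ [] ∧
  (note_seq.length = 1 ∨ (note_seq.length ≤ note_dur.length ∧ note_seq.length ≤ note_slur.length))
instance (note_seq : List String) (note_dur : List Int) (note_slur : List Bool) : Decidable (Pre_merge_slurs note_seq note_dur note_slur) := by unfold Pre_merge_slurs; infer_instance

def pvWitness_merge_slurs : List String × List Int × List Bool :=
  (["C4", "C4", "D4"], [1, 2, 3], [false, true, false])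

def Spec_merge_slurs (note_seq : List String) (note_dur : List Int) (note_slur : List Bool) (out : List String × List Int) : Prop := out = merge_slurs_alt note_seq note_dur note_slur
instance (note_seq : List String) (note_dur : List Int) (note_slur : List Bool) (out : List String × List Int) : Decidable (Spec_merge_slurs note_seq note_dur note_slur out) := by unfold Spec_merge_slurs; infer_instance

-- ===== CLAIM (what is proved, stated in full; the proofs are below) =====
def Claim_equal_merge_slurs : Prop := ∀ (note_seq : List String) (note_dur : List Int) (note_slur : List Bool), Dom_merge_slurs note_seq note_dur note_slur → Pre_merge_slurs note_seq note_dur note_slur → Spec_merge_slurs note_seq note_dur note_slur (merge_slurs note_seq note_dur note_slur)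

-- ===== LEMMAS AND PROOFS =====

-- named step functions, definitionally equal to the inline lambdas of the ports
def msStepA (note_seq : List String) (note_dur : List Int) (note_slur : List Bool)
    (acc : List String × List Int) (i : Int) : List String × List Int :=
  if PySem.List.pyGetD note_slur i false &&
      decide (PySem.List.pyGetD note_seq i "" = PySem.List.pyGetD note_seq (i - 1) "") then
    (acc.1, acc.2.dropLast ++ [PySem.List.pyGetD acc.2 (-1) 0 + PySem.List.pyGetD note_dur i 0])
  else
    (acc.1 ++ [PySem.List.pyGetD note_seq i ""], acc.2 ++ [PySem.List.pyGetD note_dur i 0])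

def msStepB (note_seq : List String) (note_slur : List Bool)
    (st : List (Int × Int) × Int) (i : Int) : List (Int × Int) × Int :=
  if !(PySem.List.pyGetD note_slur i false &&
       decide (PySem.List.pyGetD note_seq i "" = PySem.List.pyGetD note_seq (i - 1) "")) then
    (st.1 ++ [(st.2, i)], i)
  else st

lemma merge_slurs_eq (note_seq : List String) (note_dur : List Int) (note_slur : List Bool) :
    merge_slurs note_seq note_dur note_slur =
      (PySem.List.pyRange 1 (PySem.List.len note_seq) 1).foldl (msStepA note_seq note_dur note_slur)
        ([PySem.List.pyGetD note_seq 0 ""], [PySem.List.pyGetD note_dur 0 0]) := rfl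

lemma msRuns_eq (note_seq : List String) (note_slur : List Bool) :
    msRuns note_seq note_slur =
      (let st := (PySem.List.pyRange 1 (PySem.List.len note_seq) 1).foldl (msStepB note_seq note_slur) ([], 0)
       st.1 ++ [(st.2, PySem.List.len note_seq)]) := rfl

lemma msSumDur_succ (note_dur : List Int) (s b : Int) (h : s + 1 ≤ b) :
    msSumDur note_dur s (b + 1) = msSumDur note_dur s b + PySem.List.pyGetD note_dur b 0 := by
  unfold msSumDur
  rw [PySem.List.pyRange_one_succ_right h, List.foldl_append]
  rfl

lemma msSumDur_single (note_dur : List Int) (b : Int) :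
    msSumDur note_dur b (b + 1) = PySem.List.pyGetD note_dur b 0 := by
  unfold msSumDur
  rw [PySem.List.pyRange_one_eq_nil (by omega)]
  rfl

-- the loop invariant: after processing indices 1..b-1, A's state is exactly the pitch/sum maps
-- of B's closed runs plus the currently open run (start, b); the open start stays in [0, b).
lemma ms_invariant (note_seq : List String) (note_dur : List Int) (note_slur : List Bool) (m : Nat) :
    ((PySem.List.pyRange 1 ((m : Int) + 1) 1).foldl (msStepA note_seq note_dur note_slur)
        ([PySem.List.pyGetD note_seq 0 ""], [PySem.List.pyGetD note_dur 0 0]) =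
      (let sB := (PySem.List.pyRange 1 ((m : Int) + 1) 1).foldl (msStepB note_seq note_slur) ([], 0)
       ((sB.1 ++ [(sB.2, (m : Int) + 1)]).map (fun r => PySem.List.pyGetD note_seq r.1 ""),
        (sB.1 ++ [(sB.2, (m : Int) + 1)]).map (fun r => msSumDur note_dur r.1 r.2))))
    ∧ 0 ≤ ((PySem.List.pyRange 1 ((m : Int) + 1) 1).foldl (msStepB note_seq note_slur) ([], 0)).2
    ∧ ((PySem.List.pyRange 1 ((m : Int) + 1) 1).foldl (msStepB note_seq note_slur) ([], 0)).2 < (m : Int) + 1 := by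
  induction m with
  | zero =>
    rw [PySem.List.pyRange_one_eq_nil (by omega)]
    refine ⟨?_, by simp, by simp⟩
    have h1 : msSumDur note_dur 0 1 = PySem.List.pyGetD note_dur 0 0 := by
      unfold msSumDur
      rw [PySem.List.pyRange_one_eq_nil (by omega : (1 : Int) ≤ 0 + 1)]
      rfl
    simp [List.foldl, h1]
  | succ k ih =>
    obtain ⟨ihEq, ihNonneg, ihLt⟩ := ih
    push_cast
    have hsplit : PySem.List.pyRange 1 (((k : Int) + 1) + 1) 1 =
        PySem.List.pyRange 1 ((k : Int) + 1) 1 ++ [(k : Int) + 1] := by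
      rw [PySem.List.pyRange_one_succ_right (by omega)]
    rw [hsplit, List.foldl_append, List.foldl_append, ihEq]
    set sB := (PySem.List.pyRange 1 ((k : Int) + 1) 1).foldl (msStepB note_seq note_slur) ([], 0)
    simp only [List.foldl]
    by_cases hc : (PySem.List.pyGetD note_slur ((k : Int) + 1) false &&
        decide (PySem.List.pyGetD note_seq ((k : Int) + 1) "" =
                PySem.List.pyGetD note_seq (((k : Int) + 1) - 1) "")) = true
    · -- slur continues: A adds into the last duration, B keeps its state (the open run grows)
      have hB : msStepB note_seq note_slur sB ((k : Int) + 1) = sB := by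
        unfold msStepB
        rw [hc]
        simp
      rw [hB]
      refine ⟨?_, ihNonneg, by omega⟩
      have hstep : msSumDur note_dur sB.2 (((k : Int) + 1) + 1) =
          msSumDur note_dur sB.2 ((k : Int) + 1) + PySem.List.pyGetD note_dur ((k : Int) + 1) 0 :=
        msSumDur_succ note_dur sB.2 ((k : Int) + 1) (by omega)
      simp only [msStepA]
      rw [hc]
      simp [hstep, List.dropLast_concat, PySem.List.pyGetD_neg_one_append_singleton]
    · -- boundary: A appends a fresh (pitch, dur), B closes the run and opens (b, b+1)
      have hcF : (PySem.List.pyGetD note_slur ((k : Int) + 1) false &&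
          decide (PySem.List.pyGetD note_seq ((k : Int) + 1) "" =
                  PySem.List.pyGetD note_seq (((k : Int) + 1) - 1) "")) = false := by
        revert hc
        cases (PySem.List.pyGetD note_slur ((k : Int) + 1) false &&
          decide (PySem.List.pyGetD note_seq ((k : Int) + 1) "" =
                  PySem.List.pyGetD note_seq (((k : Int) + 1) - 1) "")) <;> simp
      have hB : msStepB note_seq note_slur sB ((k : Int) + 1) =
          (sB.1 ++ [(sB.2, (k : Int) + 1)], (k : Int) + 1) := by
        unfold msStepB
        rw [hcF]
        simp
      rw [hB]
      refine ⟨?_, by omega, by omega⟩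
      have hone : msSumDur note_dur ((k : Int) + 1) (((k : Int) + 1) + 1) =
          PySem.List.pyGetD note_dur ((k : Int) + 1) 0 := msSumDur_single note_dur ((k : Int) + 1)
      simp only [msStepA]
      rw [hcF]
      simp [hone]

lemma ms_main (note_seq : List String) (note_dur : List Int) (note_slur : List Bool)
    (h : note_seq ≠ []) :
    merge_slurs note_seq note_dur note_slur = merge_slurs_alt note_seq note_dur note_slur := by
  obtain ⟨m, hm⟩ : ∃ m : Nat, note_seq.length = m + 1 := by
    cases note_seq with
    | nil => exact absurd rfl h
    | cons x xs => exact ⟨xs.length, rfl⟩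
  have hlen : PySem.List.len note_seq = (m : Int) + 1 := by
    simp [PySem.List.len_eq, hm]
  have := (ms_invariant note_seq note_dur note_slur m).1
  rw [merge_slurs_eq, hlen, this]
  rw [merge_slurs_alt, msRuns_eq, hlen]

-- ===== VERDICT (by name: the statement is the Claim_ definition above) =====
theorem merge_slurs_spec : Claim_equal_merge_slurs := by
  intro note_seq note_dur note_slur _ hpre
  exact ms_main note_seq note_dur note_slur hpre.1
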